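-- pv_equiv track=rewrite | github.com/hamster0523/Graph_Calibration | hamster_agent/app/tool/excel_analysis/excel_column_analysis_tool.py | _match_to_refined_categories
-- ===== SOURCE A (Python) =====
-- from typing import Dict, List, Any, Optional, Tuple
--
-- def _match_to_refined_categories(
--
--     column_name: str,
--     basic_category: str,
--     refined_categories: Dict[str, Dict[str, List[str]]]
-- ) -> Tuple[str, str]:
--     """
--     Match a column name to the refined category system
--
--     Args:
--         column_name: The column name to match
--         basic_category: The basic category from simple matching
--         refined_categories: The refined categorization system
--
--     Returns:
--         A tuple of (main category, subcategory)
--     """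
--     column_lower = column_name.lower()
--
--     # First try to match within the expected main category (if it exists in the refined system)
--     if basic_category in refined_categories:
--         for subcategory, keywords in refined_categories[basic_category].items():
--             for keyword in keywords:
--                 if keyword in column_lower:
--                     return basic_category, subcategory
--
--     # If no match in the expected category, try all categories
--     for main_category, subcategories in refined_categories.items():
--         for subcategory, keywords in subcategories.items():
--             for keyword in keywords:
--                 if keyword in column_lower:
--                     return main_category, subcategory
--
--     # If still no match, return the basic category with "general" subcategory
--     return basic_category, "general"
-- ===== SOURCE B (Python) =====
-- def _match_to_refined_categories(column_name, basic_category, refined_categories):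
--     # Exhaustive scan: rank every matching (category, subcategory) and return the
--     # minimum-rank one, instead of early-returning through two phased scans.
--     col = column_name.lower()
--     best_rank = None
--     best = None
--     for ci, (main, subs) in enumerate(refined_categories.items()):
--         pri = 0 if main == basic_category else 1
--         for si, (sub, kws) in enumerate(subs.items()):
--             if any(kw in col for kw in kws):
--                 rank = (pri, ci, si)
--                 if best_rank is None or rank < best_rank:
--                     best_rank = rank
--                     best = (main, sub)
--     return best if best is not None else (basic_category, "general")
-- ===== Notes on version B (the rewrite author's own statement) =====
-- stated objective: alternative
-- what changed: Replaces A's early-return two-phase scan by an exhaustive pass that ranks every matching (category, subcategory) with a priority tuple (basic-category-first, dict order) and returns the minimum-rank match, defaulting to (basic_category, 'general').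
import Mathlib
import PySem

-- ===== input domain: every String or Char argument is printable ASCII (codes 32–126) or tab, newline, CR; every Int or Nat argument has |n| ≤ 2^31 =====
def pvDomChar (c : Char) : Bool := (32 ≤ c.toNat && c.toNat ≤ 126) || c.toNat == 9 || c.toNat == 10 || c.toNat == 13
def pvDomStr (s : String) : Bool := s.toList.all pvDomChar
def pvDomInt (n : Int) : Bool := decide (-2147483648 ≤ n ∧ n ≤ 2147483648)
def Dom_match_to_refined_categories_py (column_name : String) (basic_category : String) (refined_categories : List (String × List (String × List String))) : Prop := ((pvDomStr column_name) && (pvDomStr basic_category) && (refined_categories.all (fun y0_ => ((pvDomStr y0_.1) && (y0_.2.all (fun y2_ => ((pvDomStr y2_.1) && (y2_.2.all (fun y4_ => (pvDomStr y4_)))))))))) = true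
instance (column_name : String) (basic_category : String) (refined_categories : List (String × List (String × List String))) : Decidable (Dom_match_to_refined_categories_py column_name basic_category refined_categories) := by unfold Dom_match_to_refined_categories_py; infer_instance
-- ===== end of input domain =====

-- B replaces A's early-return two-phase scan by an exhaustive pass that ranks every matching
-- (category, subcategory) pair and returns the minimum-rank one (objective: alternative).

-- ===== PORT A =====
-- inner loop: for keyword in keywords: if keyword in column_lower: return (main, sub)
def pvKwLoopA (colL : String) (main sub : String) : List String → Option (String × String)
  | [] => none
  | kw :: rest => if PySem.Str.isIn kw colL then some (main, sub) else pvKwLoopA colL main sub rest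

-- middle loop: for subcategory, keywords in subcategories.items(): …
def pvSubLoopA (colL : String) (main : String) : List (String × List String) → Option (String × String)
  | [] => none
  | (sub, kws) :: rest =>
    match pvKwLoopA colL main sub kws with
    | some r => some r
    | none => pvSubLoopA colL main rest

-- outer loop of phase 2: for main_category, subcategories in refined_categories.items(): …
def pvCatLoopA (colL : String) : List (String × List (String × List String)) → Option (String × String)
  | [] => none
  | (main, subs) :: rest =>
    match pvSubLoopA colL main subs with
    | some r => some r
    | none => pvCatLoopA colL rest

def match_to_refined_categories_py (column_name : String) (basic_category : String) (refined_categories : List (String × List (String × List String))) : String × String :=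
  let colL := PySem.Str.lower column_name
  -- phase 1: if basic_category in refined_categories, scan only its subcategories
  let phase1 : Option (String × String) :=
    match List.lookup basic_category refined_categories with
    | some subs => pvSubLoopA colL basic_category subs
    | none => none
  match phase1 with
  | some r => r
  | none =>
    -- phase 2: scan all categories
    match pvCatLoopA colL refined_categories with
    | some r => r
    | none => (basic_category, "general")

-- ===== PORT B =====
-- a candidate: (rank, (main category, subcategory))
abbrev pvCand : Type := (Nat × Nat × Nat) × String × String

-- Python tuple comparison rank < best_rank on the (pri, ci, si) triples
def pvRankLt (a b : Nat × Nat × Nat) : Bool :=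
  a.1 < b.1 || (a.1 == b.1 && (a.2.1 < b.2.1 || (a.2.1 == b.2.1 && a.2.2 < b.2.2)))

-- if best_rank is None or rank < best_rank: best = …
def pvMinStep (best : Option pvCand) (c : pvCand) : Option pvCand :=
  match best with
  | none => some c
  | some b => if pvRankLt c.1 b.1 then some c else some b

-- inner loop: for si, (sub, kws) in enumerate(subs.items()): if any(kw in col …): …
def pvSubScanB (colL main : String) (pri ci : Nat) : Nat → Option pvCand → List (String × List String) → Option pvCand
  | _, best, [] => best
  | si, best, (sub, kws) :: rest =>
    pvSubScanB colL main pri ci (si + 1)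
      (if kws.any (fun kw => PySem.Str.isIn kw colL) then pvMinStep best ((pri, ci, si), main, sub) else best) rest

-- outer loop: for ci, (main, subs) in enumerate(refined_categories.items()): …
def pvCatScanB (colL basic : String) : Nat → Option pvCand → List (String × List (String × List String)) → Option pvCand
  | _, best, [] => best
  | ci, best, (main, subs) :: rest =>
    pvCatScanB colL basic (ci + 1) (pvSubScanB colL main (if main == basic then 0 else 1) ci 0 best subs) rest

def match_to_refined_categories_py_alt (column_name : String) (basic_category : String) (refined_categories : List (String × List (String × List String))) : String × String :=
  let colL := PySem.Str.lower column_name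
  match pvCatScanB colL basic_category 0 none refined_categories with
  | some c => c.2
  | none => (basic_category, "general")

-- ===== PRECONDITION & SPEC =====
-- Pre_ excludes association lists with duplicate main-category keys: those do not encode any
-- Python dict (a dict's keys are unique), so the original A never receives them.
def Pre_match_to_refined_categories_py (column_name : String) (basic_category : String) (refined_categories : List (String × List (String × List String))) : Prop :=
  (refined_categories.map Prod.fst).Nodup
instance (column_name : String) (basic_category : String) (refined_categories : List (String × List (String × List String))) : Decidable (Pre_match_to_refined_categories_py column_name basic_category refined_categories) := by unfold Pre_match_to_refined_categories_py; infer_instance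

def pvWitness_match_to_refined_categories_py : String × String × (List (String × List (String × List String))) :=
  ("Unit Price USD", "finance", [("finance", [("price", ["price", "cost"])]), ("time", [("date", ["date"])])])

def Spec_match_to_refined_categories_py (column_name : String) (basic_category : String) (refined_categories : List (String × List (String × List String))) (out : String × String) : Prop := out = match_to_refined_categories_py_alt column_name basic_category refined_categories
instance (column_name : String) (basic_category : String) (refined_categories : List (String × List (String × List String))) (out : String × String) : Decidable (Spec_match_to_refined_categories_py column_name basic_category refined_categories out) := by unfold Spec_match_to_refined_categories_py; infer_instance

-- ===== CLAIM (what is proved, stated in full; the proofs are below) =====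
def Claim_equal_match_to_refined_categories_py : Prop := ∀ (column_name : String) (basic_category : String) (refined_categories : List (String × List (String × List String))), Dom_match_to_refined_categories_py column_name basic_category refined_categories → Pre_match_to_refined_categories_py column_name basic_category refined_categories → Spec_match_to_refined_categories_py column_name basic_category refined_categories (match_to_refined_categories_py column_name basic_category refined_categories)

-- ===== LEMMAS AND PROOFS =====

-- the flat candidate list B's scan effectively minimises over
def pvCandsSub (colL main : String) (pri ci : Nat) : Nat → List (String × List String) → List pvCand
  | _, [] => []
  | si, (sub, kws) :: rest =>
    (if kws.any (fun kw => PySem.Str.isIn kw colL) then [((pri, ci, si), main, sub)] else []) ++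
      pvCandsSub colL main pri ci (si + 1) rest

def pvCandsCat (colL basic : String) : Nat → List (String × List (String × List String)) → List pvCand
  | _, [] => []
  | ci, (main, subs) :: rest =>
    pvCandsSub colL main (if main == basic then 0 else 1) ci 0 subs ++ pvCandsCat colL basic (ci + 1) rest

def pvFoldMin (best : Option pvCand) (l : List pvCand) : Option pvCand := l.foldl pvMinStep best

theorem pvKwLoopA_eq (colL main sub : String) (kws : List String) :
    pvKwLoopA colL main sub kws =
      (if kws.any (fun kw => PySem.Str.isIn kw colL) then some (main, sub) else none) := by
  induction kws with
  | nil => simp [pvKwLoopA]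
  | cons kw rest ih =>
    cases hI : PySem.Str.isIn kw colL with
    | false => simp only [pvKwLoopA, hI, Bool.false_eq_true, if_false, ih, List.any_cons,
        Bool.false_or]
    | true => simp only [pvKwLoopA, hI, if_true, List.any_cons, Bool.true_or]

theorem pvSubScanB_eq (colL main : String) (pri ci : Nat) (subs : List (String × List String)) :
    ∀ (si : Nat) (best : Option pvCand),
      pvSubScanB colL main pri ci si best subs = pvFoldMin best (pvCandsSub colL main pri ci si subs) := by
  induction subs with
  | nil => intro si best; rfl
  | cons p rest ih =>
    intro si best
    obtain ⟨sub, kws⟩ := p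
    cases h : kws.any (fun kw => PySem.Str.isIn kw colL) with
    | false =>
      simp only [pvSubScanB, pvCandsSub, h, Bool.false_eq_true, if_false, List.nil_append]
      exact ih _ _
    | true =>
      simp only [pvSubScanB, pvCandsSub, h, if_true, pvFoldMin]
      exact ih _ _

theorem pvCatScanB_eq (colL basic : String) (rc : List (String × List (String × List String))) :
    ∀ (ci : Nat) (best : Option pvCand),
      pvCatScanB colL basic ci best rc = pvFoldMin best (pvCandsCat colL basic ci rc) := by
  induction rc with
  | nil => intro ci best; rfl
  | cons p rest ih =>
    intro ci best
    obtain ⟨main, subs⟩ := p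
    simp only [pvCatScanB, pvCandsCat, ih, pvSubScanB_eq, pvFoldMin, List.foldl_append]

theorem pvCandsCat_append (colL basic : String) (xs ys : List (String × List (String × List String))) :
    ∀ ci, pvCandsCat colL basic ci (xs ++ ys) =
      pvCandsCat colL basic ci xs ++ pvCandsCat colL basic (ci + xs.length) ys := by
  induction xs with
  | nil => intro ci; simp [pvCandsCat]
  | cons p rest ih =>
    intro ci
    obtain ⟨main, subs⟩ := p
    simp only [List.cons_append, pvCandsCat, ih, List.append_assoc, List.length_cons]
    have : ci + 1 + rest.length = ci + (rest.length + 1) := by omega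
    rw [this]

theorem pvFoldMin_keep (x : pvCand) (l : List pvCand)
    (h : ∀ c ∈ l, pvRankLt c.1 x.1 = false) : pvFoldMin (some x) l = some x := by
  induction l with
  | nil => rfl
  | cons c rest ih =>
    have hc := h c (by simp)
    simp only [pvFoldMin, List.foldl_cons, pvMinStep, hc, Bool.false_eq_true, if_false]
    exact ih (fun d hd => h d (by simp [hd]))

theorem pvFoldMin_mem (l : List pvCand) : ∀ (best : Option pvCand),
    pvFoldMin best l = best ∨ ∃ c ∈ l, pvFoldMin best l = some c := by
  induction l with
  | nil => intro best; left; rfl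
  | cons c rest ih =>
    intro best
    have step : pvMinStep best c = best ∨ pvMinStep best c = some c := by
      cases best with
      | none => right; rfl
      | some b =>
        by_cases h : pvRankLt c.1 b.1 = true
        · right; simp [pvMinStep, h]
        · left; simp [pvMinStep, h]
    have : pvFoldMin best (c :: rest) = pvFoldMin (pvMinStep best c) rest := rfl
    rw [this]
    rcases ih (pvMinStep best c) with h1 | ⟨d, hd, h1⟩
    · rcases step with h2 | h2
      · left; rw [h1, h2]
      · right; exact ⟨c, by simp, by rw [h1, h2]⟩
    · right; exact ⟨d, by simp [hd], h1⟩

theorem pvFoldMin_first (c0 : pvCand) (l1 l2 : List pvCand)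
    (h1 : ∀ c ∈ l1, pvRankLt c0.1 c.1 = true)
    (h2 : ∀ c ∈ l2, pvRankLt c.1 c0.1 = false) :
    pvFoldMin none (l1 ++ c0 :: l2) = some c0 := by
  have hsplit : pvFoldMin none (l1 ++ c0 :: l2) =
      pvFoldMin (pvMinStep (pvFoldMin none l1) c0) l2 := by
    simp [pvFoldMin, List.foldl_append]
  rw [hsplit]
  have hstep : pvMinStep (pvFoldMin none l1) c0 = some c0 := by
    rcases pvFoldMin_mem l1 none with h | ⟨c, hc, h⟩
    · rw [h]; rfl
    · rw [h]; simp [pvMinStep, h1 c hc]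
  rw [hstep]
  exact pvFoldMin_keep c0 l2 h2

theorem pvFoldMin_head (l : List pvCand)
    (h : List.Pairwise (fun a b => pvRankLt b.1 a.1 = false) l) :
    pvFoldMin none l = l.head? := by
  cases l with
  | nil => rfl
  | cons c rest =>
    have : pvFoldMin none (c :: rest) = pvFoldMin (some c) rest := rfl
    rw [this, pvFoldMin_keep c rest (List.pairwise_cons.mp h).1]
    rfl

theorem pvCandsSub_mem (colL main : String) (pri ci : Nat) (subs : List (String × List String)) :
    ∀ si, ∀ c ∈ pvCandsSub colL main pri ci si subs,
      c.1.1 = pri ∧ c.1.2.1 = ci ∧ si ≤ c.1.2.2 := by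
  induction subs with
  | nil => intro si c hc; simp [pvCandsSub] at hc
  | cons p rest ih =>
    intro si c hc
    obtain ⟨sub, kws⟩ := p
    simp only [pvCandsSub, List.mem_append] at hc
    rcases hc with hc | hc
    · split at hc
      · simp only [List.mem_singleton] at hc; subst hc; exact ⟨rfl, rfl, le_refl _⟩
      · simp at hc
    · have := ih (si + 1) c hc
      exact ⟨this.1, this.2.1, by omega⟩

theorem pvCandsSub_pairwise (colL main : String) (pri ci : Nat) (subs : List (String × List String)) :
    ∀ si, List.Pairwise (fun a b : pvCand => pvRankLt b.1 a.1 = false)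
      (pvCandsSub colL main pri ci si subs) := by
  induction subs with
  | nil => intro si; simp [pvCandsSub]
  | cons p rest ih =>
    intro si
    obtain ⟨sub, kws⟩ := p
    simp only [pvCandsSub]
    refine List.pairwise_append.mpr ⟨?_, ih (si + 1), ?_⟩
    · split <;> simp
    · intro a ha b hb
      split at ha
      · simp only [List.mem_singleton] at ha; subst ha
        have hb' := pvCandsSub_mem colL main pri ci rest (si + 1) b hb
        simp only [pvRankLt]
        rw [hb'.1, hb'.2.1]
        simp only [lt_irrefl, decide_false, Bool.false_or, beq_self_eq_true, Bool.true_and]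
        have : ¬ b.1.2.2 < si := by omega
        simp [this]
      · simp at ha

theorem pvCandsSub_empty (colL main : String) (pri ci : Nat) (subs : List (String × List String))
    (hq : ∀ q ∈ subs, q.2.any (fun kw => PySem.Str.isIn kw colL) = false) :
    ∀ si, pvCandsSub colL main pri ci si subs = [] := by
  induction subs with
  | nil => intro si; rfl
  | cons p rest ih =>
    intro si
    obtain ⟨sub, kws⟩ := p
    have h0 : kws.any (fun kw => PySem.Str.isIn kw colL) = false := hq (sub, kws) (by simp)
    simp only [pvCandsSub, h0, Bool.false_eq_true, if_false, List.nil_append]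
    exact ih (fun q h => hq q (by simp [h])) (si + 1)

-- entries whose key equals basic contribute no candidate (hypothesis hb); then every
-- candidate has priority 1 and a column index ≥ ci, and the list is rank-ascending
theorem pvCandsCat_props (colL basic : String) (rc : List (String × List (String × List String)))
    (hb : ∀ p ∈ rc, p.1 = basic → ∀ q ∈ p.2, q.2.any (fun kw => PySem.Str.isIn kw colL) = false) :
    ∀ ci, (∀ c ∈ pvCandsCat colL basic ci rc, c.1.1 = 1 ∧ ci ≤ c.1.2.1) ∧
      List.Pairwise (fun a b : pvCand => pvRankLt b.1 a.1 = false) (pvCandsCat colL basic ci rc) := by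
  induction rc with
  | nil =>
    intro ci
    exact ⟨fun c hc => by simp [pvCandsCat] at hc, by simp [pvCandsCat]⟩
  | cons p rest ih =>
    intro ci
    obtain ⟨main, subs⟩ := p
    have hbrest : ∀ p ∈ rest, p.1 = basic → ∀ q ∈ p.2, q.2.any (fun kw => PySem.Str.isIn kw colL) = false :=
      fun p hp => hb p (by simp [hp])
    have ihr := ih hbrest (ci + 1)
    have hpri : ∀ c ∈ pvCandsSub colL main (if main == basic then 0 else 1) ci 0 subs, c.1.1 = 1 ∧ c.1.2.1 = ci := by
      intro c hc
      have hm := pvCandsSub_mem colL main (if main == basic then 0 else 1) ci subs 0 c hc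
      refine ⟨?_, hm.2.1⟩
      by_cases hk : main == basic
      · exfalso
        have hempty : pvCandsSub colL main (if main == basic then 0 else 1) ci 0 subs = [] := by
          have hq := hb (main, subs) (by simp) (by simpa using eq_of_beq hk)
          exact pvCandsSub_empty colL main _ ci subs hq 0
        rw [hempty] at hc; simp at hc
      · rw [hm.1]; simp [hk]
    constructor
    · intro c hc
      simp only [pvCandsCat, List.mem_append] at hc
      rcases hc with hc | hc
      · exact ⟨(hpri c hc).1, le_of_eq (hpri c hc).2.symm⟩
      · exact ⟨(ihr.1 c hc).1, by have := (ihr.1 c hc).2; omega⟩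
    · simp only [pvCandsCat]
      refine List.pairwise_append.mpr ⟨pvCandsSub_pairwise colL main _ ci subs 0, ihr.2, ?_⟩
      intro a ha b hb'
      have ha' := hpri a ha
      have hbm := ihr.1 b hb'
      simp only [pvRankLt]
      rw [ha'.1, ha'.2, hbm.1]
      have h1 : ¬ b.1.2.1 < ci := by omega
      by_cases he : b.1.2.1 = ci
      · omega
      · simp [h1, he]

theorem pvSubLoopA_head (colL main : String) (pri ci : Nat) (subs : List (String × List String)) :
    ∀ si, pvSubLoopA colL main subs =
      (pvCandsSub colL main pri ci si subs).head?.map (fun c => c.2) := by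
  induction subs with
  | nil => intro si; rfl
  | cons p rest ih =>
    intro si
    obtain ⟨sub, kws⟩ := p
    cases h : kws.any (fun kw => PySem.Str.isIn kw colL) with
    | false =>
      simp only [pvSubLoopA, pvKwLoopA_eq, h, Bool.false_eq_true, if_false, pvCandsSub,
        List.nil_append]
      exact ih (si + 1)
    | true =>
      simp only [pvSubLoopA, pvKwLoopA_eq, h, if_true, pvCandsSub, List.singleton_append,
        List.head?_cons, Option.map_some]

theorem pvCatLoopA_head (colL basic : String) (rc : List (String × List (String × List String))) :
    ∀ ci, pvCatLoopA colL rc = (pvCandsCat colL basic ci rc).head?.map (fun c => c.2) := by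
  induction rc with
  | nil => intro ci; rfl
  | cons p rest ih =>
    intro ci
    obtain ⟨main, subs⟩ := p
    simp only [pvCatLoopA, pvCandsCat, List.head?_append]
    rw [pvSubLoopA_head colL main (if main == basic then 0 else 1) ci subs 0]
    cases hh : (pvCandsSub colL main (if main == basic then 0 else 1) ci 0 subs).head? with
    | some c => simp
    | none => simp only [Option.map_none, Option.none_or]; exact ih (ci + 1)

theorem pvCandsSub_nil (colL main : String) (pri ci : Nat) (subs : List (String × List String)) :
    ∀ si, pvCandsSub colL main pri ci si subs = [] →
      ∀ q ∈ subs, q.2.any (fun kw => PySem.Str.isIn kw colL) = false := by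
  induction subs with
  | nil => intro si _ q hq; simp at hq
  | cons p rest ih =>
    intro si hnil q hq
    simp only [pvCandsSub] at hnil
    rcases List.append_eq_nil_iff.mp hnil with ⟨h1, h2⟩
    rcases List.mem_cons.mp hq with rfl | hq
    · cases hA : q.2.any (fun kw => PySem.Str.isIn kw colL) with
      | false => rfl
      | true => rw [hA] at h1; simp at h1
    · exact ih (si + 1) h2 q hq

theorem pvLookupNone (basic : String) (rc : List (String × List (String × List String)))
    (h : List.lookup basic rc = none) : basic ∉ rc.map Prod.fst := by
  induction rc with
  | nil => simp
  | cons p rest ih =>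
    obtain ⟨k, v⟩ := p
    simp only [List.lookup_cons] at h
    by_cases hk : basic == k
    · simp [hk] at h
    · simp only [hk] at h
      simp only [List.map_cons, List.mem_cons]
      rintro (rfl | hm)
      · simp at hk
      · exact ih h hm

theorem pvLookupSplit (basic : String) (subs : List (String × List String))
    (rc : List (String × List (String × List String)))
    (h : List.lookup basic rc = some subs) :
    ∃ l1 l2, rc = l1 ++ (basic, subs) :: l2 ∧ basic ∉ l1.map Prod.fst := by
  induction rc with
  | nil => simp at h
  | cons p rest ih =>
    obtain ⟨k, v⟩ := p
    simp only [List.lookup_cons] at h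
    by_cases hk : basic == k
    · have : k = basic := (eq_of_beq hk).symm
      subst this
      simp only [beq_self_eq_true, Option.some.injEq] at h
      subst h
      exact ⟨[], rest, by simp⟩
    · simp only [hk] at h
      obtain ⟨l1, l2, heq, hni⟩ := ih h
      refine ⟨(k, v) :: l1, l2, by simp [heq], ?_⟩
      simp only [List.map_cons, List.mem_cons]
      rintro (rfl | hm)
      · simp at hk
      · exact hni hm

-- ===== VERDICT (by name: the statement is the Claim_ definition above) =====
theorem match_to_refined_categories_py_spec : Claim_equal_match_to_refined_categories_py := by
  intro column_name basic rc _hDom hPre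
  unfold Spec_match_to_refined_categories_py
  simp only [match_to_refined_categories_py, match_to_refined_categories_py_alt]
  set colL := PySem.Str.lower column_name with hcol
  rw [pvCatScanB_eq]
  cases hlk : List.lookup basic rc with
  | none =>
    have hnb := pvLookupNone basic rc hlk
    have hb : ∀ p ∈ rc, p.1 = basic → ∀ q ∈ p.2, q.2.any (fun kw => PySem.Str.isIn kw colL) = false := by
      intro p hp hpk
      exact absurd (hpk ▸ List.mem_map_of_mem hp) hnb
    rw [pvFoldMin_head _ ((pvCandsCat_props colL basic rc hb 0).2),
      pvCatLoopA_head colL basic rc 0]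
    cases (pvCandsCat colL basic 0 rc).head? with
    | none => rfl
    | some c => rfl
  | some subs =>
    obtain ⟨rc1, rc2, heq, hni1⟩ := pvLookupSplit basic subs rc hlk
    have hnodup := hPre
    rw [heq] at hnodup
    simp only [Pre_match_to_refined_categories_py] at hnodup
    have hni2 : basic ∉ rc2.map Prod.fst := by
      rw [List.map_append, List.map_cons] at hnodup
      have := List.Nodup.of_append_right hnodup
      exact (List.nodup_cons.mp this).1
    cases hscan : pvSubLoopA colL basic subs with
    | none =>
      -- basic's entry contributes no candidates: whole list is priority-1 ascending
      simp only [hscan]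
      have hnil : pvCandsSub colL basic 0 0 0 subs = [] := by
        have hh := pvSubLoopA_head colL basic 0 0 subs 0
        rw [hscan] at hh
        cases hc : pvCandsSub colL basic 0 0 0 subs with
        | nil => rfl
        | cons c cs => rw [hc] at hh; simp at hh
      have hbq := pvCandsSub_nil colL basic 0 0 subs 0 hnil
      have hb : ∀ p ∈ rc, p.1 = basic → ∀ q ∈ p.2, q.2.any (fun kw => PySem.Str.isIn kw colL) = false := by
        intro p hp hpk q hq
        rw [heq] at hp
        simp only [List.mem_append, List.mem_cons] at hp
        rcases hp with hp | hp | hp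
        · exact absurd (hpk ▸ List.mem_map_of_mem hp) hni1
        · subst hp; exact hbq q hq
        · exact absurd (hpk ▸ List.mem_map_of_mem hp) hni2
      rw [pvFoldMin_head _ ((pvCandsCat_props colL basic rc hb 0).2),
        pvCatLoopA_head colL basic rc 0]
      cases (pvCandsCat colL basic 0 rc).head? with
      | none => rfl
      | some c => rfl
    | some r =>
      -- the basic entry has the unique priority-0 candidates; its first one wins
      simp only [hscan]
      have hb1 : ∀ p ∈ rc1, p.1 = basic → ∀ q ∈ p.2, q.2.any (fun kw => PySem.Str.isIn kw colL) = false :=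
        fun p hp hpk => absurd (hpk ▸ List.mem_map_of_mem hp) hni1
      have hb2 : ∀ p ∈ rc2, p.1 = basic → ∀ q ∈ p.2, q.2.any (fun kw => PySem.Str.isIn kw colL) = false :=
        fun p hp hpk => absurd (hpk ▸ List.mem_map_of_mem hp) hni2
      have hdec : pvCandsCat colL basic 0 rc =
          pvCandsCat colL basic 0 rc1 ++
            (pvCandsSub colL basic 0 rc1.length 0 subs ++ pvCandsCat colL basic (rc1.length + 1) rc2) := by
        rw [heq, pvCandsCat_append]
        simp [pvCandsCat]
      have hhead := pvSubLoopA_head colL basic 0 rc1.length subs 0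
      rw [hscan] at hhead
      cases hc0 : pvCandsSub colL basic 0 rc1.length 0 subs with
      | nil => rw [hc0] at hhead; simp at hhead
      | cons c0 cs =>
        rw [hc0] at hhead
        simp only [List.head?_cons, Option.map_some, Option.some.injEq] at hhead
        have hc0m := pvCandsSub_mem colL basic 0 rc1.length subs 0 c0 (by rw [hc0]; simp)
        have h1 : ∀ c ∈ pvCandsCat colL basic 0 rc1, pvRankLt c0.1 c.1 = true := by
          intro c hc
          have := (pvCandsCat_props colL basic rc1 hb1 0).1 c hc
          simp only [pvRankLt]
          rw [hc0m.1, this.1]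
          simp
        have h2 : ∀ c ∈ cs ++ pvCandsCat colL basic (rc1.length + 1) rc2, pvRankLt c.1 c0.1 = false := by
          intro c hc
          simp only [List.mem_append] at hc
          rcases hc with hc | hc
          · have hp := pvCandsSub_pairwise colL basic 0 rc1.length subs 0
            rw [hc0] at hp
            exact (List.pairwise_cons.mp hp).1 c hc
          · have := (pvCandsCat_props colL basic rc2 hb2 (rc1.length + 1)).1 c hc
            simp only [pvRankLt]
            rw [hc0m.1, hc0m.2.1, this.1]
            have hne : ¬ (1 : Nat) < 0 := by omega
            have hne2 : ((1 : Nat) == 0) = false := by decide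
            simp [hne, hne2]
        have hfold : pvFoldMin none (pvCandsCat colL basic 0 rc) = some c0 := by
          rw [hdec, hc0]
          have : pvCandsCat colL basic 0 rc1 ++ (c0 :: cs) ++ pvCandsCat colL basic (rc1.length + 1) rc2 =
              pvCandsCat colL basic 0 rc1 ++ c0 :: (cs ++ pvCandsCat colL basic (rc1.length + 1) rc2) := by
            simp
          rw [show pvCandsCat colL basic 0 rc1 ++ ((c0 :: cs) ++ pvCandsCat colL basic (rc1.length + 1) rc2) =
              pvCandsCat colL basic 0 rc1 ++ c0 :: (cs ++ pvCandsCat colL basic (rc1.length + 1) rc2) by simp]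
          exact pvFoldMin_first c0 _ _ h1 h2
        rw [hfold, hhead]
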